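-- pv_equiv track=rewrite | github.com/aabushnell/date-cleaning-package | DateCleaning/numbers_processing.py | check_convert_roman
-- ===== SOURCE A (Python) =====
-- def retrieve_ordinal(n):
--     """
--     Return the correct ordinal suffix to a number
--
--     :param n: Number to check
--     :type n: int
--     :return: String with the ordinal suffix
--     :rtype: str
--     """
--     if n < 0:
--         n *= -1
--     if 3 < n < 21:
--         return "th"
--     last = n % 10
--     if last == 1:
--         return "st"
--     elif last == 2:
--         return "nd"
--     elif last == 3:
--         return "rd"
--     return "th"
--
-- def check_convert_roman(text):
--     """
--     Check if roman numbers are present and convert them if it is the case.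
--     Also adds a "century" word if the roman number stands alone
--
--     :param text: Date to clean
--     :type text: list
--     :return: New text with roman numbers converted
--     :rtype: list
--     """
--     new_text = []
--     valid_roman_numerals = ["X", "V", "I", "x", "v", "i"]
--     all_roman = False
--     if all(all(letter in valid_roman_numerals for letter in word.lower()) or word in ["bc", "ad"] for word in text):
--         all_roman = True
--     for word in text:
--         if all(letter in valid_roman_numerals for letter in word):  # and word != "MID":
--             nums = {'X': 10, 'V': 5, 'I': 1, 'x': 10, 'v': 5, 'i': 1}
--             sum = 0
--             for i in range(len(word)):
--                 value = nums[word[i]]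
--                 if i + 1 < len(word) and nums[word[i + 1]] > value:
--                     sum -= value
--                 else:
--                     sum += value
--             if all_roman:
--                 new_text.append(str(sum) + retrieve_ordinal(sum))
--                 new_text.append("century")
--             else:
--                 new_text.append(str(sum))
--         else:
--             new_text.append(word)
--     return new_text
-- ===== SOURCE B (Python) =====
-- def retrieve_ordinal(n):
--     """
--     Return the correct ordinal suffix to a number
--     """
--     if n < 0:
--         n *= -1
--     if 3 < n < 21:
--         return "th"
--     last = n % 10
--     if last == 1:
--         return "st"
--     elif last == 2:
--         return "nd"
--     elif last == 3:
--         return "rd"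
--     return "th"
--
-- def check_convert_roman(text):
--     """
--     Check if roman numbers are present and convert them if it is the case.
--     Also adds a "century" word if the roman number stands alone.
--
--     Two-pass roman evaluation (sum, then subtract 2x at subtractive positions),
--     output built as a flat list of per-word pieces.
--     """
--     valid = set("XVIxvi")
--     nums = {'X': 10, 'V': 5, 'I': 1, 'x': 10, 'v': 5, 'i': 1}
--     all_roman = all(all(letter in valid for letter in word.lower()) or word in ["bc", "ad"] for word in text)
--
--     def pieces(word):
--         if not all(letter in valid for letter in word):
--             return [word]
--         total = sum(nums[c] for c in word)
--         for i in range(len(word) - 1):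
--             if nums[word[i]] < nums[word[i + 1]]:
--                 total -= 2 * nums[word[i]]
--         if all_roman:
--             return [str(total) + retrieve_ordinal(total), "century"]
--         return [str(total)]
--
--     return [p for word in text for p in pieces(word)]
-- ===== Notes on version B (the rewrite author's own statement) =====
-- stated objective: alternative
-- what changed: The roman value is computed in two passes (sum of all character values, then subtracting 2*value at each subtractive position) instead of A's single left-to-right add-or-subtract accumulator loop, and the output is built as a flat list of per-word piece lists instead of imperative appends.
import Mathlib
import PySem

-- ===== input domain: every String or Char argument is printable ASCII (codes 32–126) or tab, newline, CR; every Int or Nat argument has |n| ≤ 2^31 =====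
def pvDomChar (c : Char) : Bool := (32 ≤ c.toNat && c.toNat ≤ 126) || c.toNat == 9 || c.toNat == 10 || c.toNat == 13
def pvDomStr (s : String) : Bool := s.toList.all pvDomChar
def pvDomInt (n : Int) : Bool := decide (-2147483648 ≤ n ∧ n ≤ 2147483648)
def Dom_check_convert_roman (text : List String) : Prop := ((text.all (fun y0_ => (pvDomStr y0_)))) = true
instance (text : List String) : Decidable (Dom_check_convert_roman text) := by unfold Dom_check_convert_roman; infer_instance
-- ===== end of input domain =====

-- B computes each roman value in two passes (character sum, then subtracting 2*value at
-- subtractive positions) and builds the output as a flat list of per-word pieces, instead of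
-- A's single left-to-right add-or-subtract accumulator loop with imperative appends.


-- ===== PORT A =====
-- shared module helper (identical in Source A and Source B)
def retrieve_ordinal (n : Int) : String :=
  let n := if n < 0 then n * (-1) else n
  if 3 < n ∧ n < 21 then "th"
  else
    let last := PySem.Int.mod n 10
    if last = 1 then "st"
    else if last = 2 then "nd"
    else if last = 3 then "rd"
    else "th"

-- nums dict lookup (all chars looked up are guarded to be in the valid list, so total here)
def pvNums (c : Char) : Int :=
  if c = 'X' then 10 else if c = 'V' then 5 else if c = 'I' then 1
  else if c = 'x' then 10 else if c = 'v' then 5 else if c = 'i' then 1 else 0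

def pvValidA : List Char := ['X', 'V', 'I', 'x', 'v', 'i']

-- A's inner loop: left-to-right accumulator, looking ahead one character
def pvLoopA : List Char → Int → Int
  | [], acc => acc
  | [c], acc => acc + pvNums c          -- i + 1 = len(word): no lookahead, add
  | c :: d :: rest, acc =>              -- lookahead at word[i+1]
      pvLoopA (d :: rest) (if pvNums d > pvNums c then acc - pvNums c else acc + pvNums c)

def pvGoA (allRoman : Bool) : List String → List String
  | [] => []
  | word :: rest =>
    if word.toList.all (fun c => pvValidA.contains c) then
      let s := pvLoopA word.toList 0
      if allRoman then
        (PySem.Int.toStr s ++ retrieve_ordinal s) :: "century" :: pvGoA allRoman rest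
      else
        PySem.Int.toStr s :: pvGoA allRoman rest
    else
      word :: pvGoA allRoman rest

def check_convert_roman (text : List String) : List String :=
  let allRoman := text.all (fun word =>
    (PySem.Str.lower word).toList.all (fun c => pvValidA.contains c)
      || (word == "bc" || word == "ad"))
  pvGoA allRoman text

-- ===== PORT B =====
def pvValidB : PySem.Set Char := PySem.Set.ofList "XVIxvi".toList

-- B's second pass: subtract 2*value at each subtractive position
def pvSubPass : List Char → Int → Int
  | c :: d :: rest, t =>
      pvSubPass (d :: rest) (if pvNums c < pvNums d then t - 2 * pvNums c else t)
  | _, t => t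

def pvRomanB (w : List Char) : Int :=
  let total := w.foldl (fun a c => a + pvNums c) 0
  pvSubPass w total

def pvPiecesB (allRoman : Bool) (word : String) : List String :=
  if !(word.toList.all (fun c => pvValidB.contains c)) then [word]
  else
    let total := pvRomanB word.toList
    if allRoman then
      [PySem.Int.toStr total ++ retrieve_ordinal total, "century"]
    else
      [PySem.Int.toStr total]

def check_convert_roman_alt (text : List String) : List String :=
  let allRoman := text.all (fun word =>
    (PySem.Str.lower word).toList.all (fun c => pvValidB.contains c)
      || (word == "bc" || word == "ad"))
  text.flatMap (pvPiecesB allRoman)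

-- ===== PRECONDITION & SPEC =====
def Spec_check_convert_roman (text : List String) (out : List String) : Prop := out = check_convert_roman_alt text
instance (text : List String) (out : List String) : Decidable (Spec_check_convert_roman text out) := by unfold Spec_check_convert_roman; infer_instance

-- ===== CLAIM (what is proved, stated in full; the proofs are below) =====
def Claim_equal_check_convert_roman : Prop := ∀ (text : List String), Dom_check_convert_roman text → Spec_check_convert_roman text (check_convert_roman text)

-- ===== LEMMAS AND PROOFS =====

lemma pvValid_list_eq : pvValidB = pvValidA := by decide

lemma pvValid_same (c : Char) : pvValidB.contains c = pvValidA.contains c := by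
  rw [pvValid_list_eq]; rfl

-- the amount B's second pass subtracts, as a plain recursion
def pvD : List Char → Int
  | c :: d :: rest => (if pvNums c < pvNums d then 2 * pvNums c else 0) + pvD (d :: rest)
  | _ => 0

lemma pvSubPass_eq : ∀ (w : List Char) (t : Int), pvSubPass w t = t - pvD w := by
  intro w
  induction w with
  | nil => intro t; simp [pvSubPass, pvD]
  | cons c rest ih =>
    intro t
    cases rest with
    | nil => simp [pvSubPass, pvD]
    | cons d r =>
      simp only [pvSubPass, pvD, ih]
      split <;> omega

lemma pvFoldl_sum (w : List Char) (a : Int) :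
    w.foldl (fun a c => a + pvNums c) a = a + w.foldl (fun a c => a + pvNums c) 0 := by
  induction w generalizing a with
  | nil => simp
  | cons c rest ih =>
    simp only [List.foldl_cons]
    rw [ih (a + pvNums c), ih (0 + pvNums c)]
    omega

lemma pvLoopA_eq : ∀ (w : List Char) (acc : Int),
    pvLoopA w acc = acc + w.foldl (fun a c => a + pvNums c) 0 - pvD w := by
  intro w
  induction w with
  | nil => intro acc; simp [pvLoopA, pvD]
  | cons c rest ih =>
    intro acc
    cases rest with
    | nil => simp [pvLoopA, pvD]
    | cons d r =>
      simp only [pvLoopA, pvD, ih, List.foldl_cons]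
      rw [pvFoldl_sum r (0 + pvNums c + pvNums d), pvFoldl_sum r (0 + pvNums d)]
      split_ifs <;> omega

lemma pvRoman_eq (w : List Char) : pvLoopA w 0 = pvRomanB w := by
  rw [pvLoopA_eq, pvRomanB, pvSubPass_eq]
  omega

lemma pvGo_eq (allRoman : Bool) : ∀ (text : List String),
    pvGoA allRoman text = text.flatMap (pvPiecesB allRoman) := by
  intro text
  induction text with
  | nil => simp [pvGoA]
  | cons word rest ih =>
    simp only [pvGoA, List.flatMap_cons, pvPiecesB, pvValid_same, pvRoman_eq, ih]
    cases h : (word.toList.all fun c => pvValidA.contains c) <;>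
      simp only [h, Bool.not_true, Bool.not_false, if_true, if_false] <;>
      cases allRoman <;> simp

-- ===== VERDICT =====
theorem check_convert_roman_spec : Claim_equal_check_convert_roman := by
  intro text _
  show check_convert_roman text = check_convert_roman_alt text
  simp only [check_convert_roman, check_convert_roman_alt, pvValid_same, pvGo_eq]
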